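-- pv_equiv track=rewrite | github.com/joshuaswanson/latex-pdf-translator | translator/render.py | _math_font_prefix
-- ===== SOURCE A (Python) =====
-- def _math_font_prefix(font: str) -> str:
--     """Extract the base font prefix (e.g., 'CMMI' from 'FITVLG+CMMI10')."""
--     name = font.split("+")[-1] if "+" in font else font
--     # Match known prefixes
--     for prefix in ("CMMI", "CMBX", "CMEX", "CMSY", "CMBS", "rsfs", "EUFM"):
--         if name.startswith(prefix):
--             return prefix
--     # CMR with size suffix (CMR10, CMR7, CMR5, CMR8)
--     if name.startswith("CMR"):
--         return name[:4]  # CMR1, CMR5, CMR7, CMR8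
--     return name[:4]
-- ===== SOURCE B (Python) =====
-- def _math_font_prefix(font: str) -> str:
--     """Extract the base font prefix (e.g., 'CMMI' from 'FITVLG+CMMI10')."""
--     # All known prefixes are exactly 4 characters, and the CMR/fallback
--     # branches return name[:4] too, so the whole table collapses to name[:4].
--     name = font.split("+")[-1] if "+" in font else font
--     return name[:4]
-- ===== Notes on version B (the rewrite author's own statement) =====
-- stated objective: simpler
-- what changed: B drops the prefix table and the matching loop entirely: since every listed prefix is exactly 4 characters and the CMR/fallback branches already return name[:4], B returns name[:4] directly as a closed form.
import Mathlib
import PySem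

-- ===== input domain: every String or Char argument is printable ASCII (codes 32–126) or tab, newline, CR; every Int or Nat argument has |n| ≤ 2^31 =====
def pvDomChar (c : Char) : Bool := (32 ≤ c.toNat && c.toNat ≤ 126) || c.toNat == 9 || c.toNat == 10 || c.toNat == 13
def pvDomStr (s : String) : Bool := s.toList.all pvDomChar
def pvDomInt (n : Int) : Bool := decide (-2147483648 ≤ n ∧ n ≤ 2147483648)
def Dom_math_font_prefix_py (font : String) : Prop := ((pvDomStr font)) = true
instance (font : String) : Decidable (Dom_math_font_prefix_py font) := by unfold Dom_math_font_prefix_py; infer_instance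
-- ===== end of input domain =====

-- B replaces A's prefix table and matching loop by the closed form name[:4]
-- (every listed prefix has exactly 4 characters): simpler, same values.

-- ===== PORT A =====
-- the literal prefix tuple of A's for-loop
def pvPrefixes : List String := ["CMMI", "CMBX", "CMEX", "CMSY", "CMBS", "rsfs", "EUFM"]

def math_font_prefix_py (font : String) : String :=
  let name := if PySem.Str.isIn "+" font then
      PySem.List.pyGetD ((PySem.Str.split? font "+").getD []) (-1) ""
    else font
  -- for prefix in (...): if name.startswith(prefix): return prefix
  match pvPrefixes.find? (fun p => PySem.Str.startswith name p) with
  | some p => p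
  | none =>
    if PySem.Str.startswith name "CMR" then PySem.Str.slice name none (some 4)
    else PySem.Str.slice name none (some 4)

-- ===== PORT B =====
def math_font_prefix_py_alt (font : String) : String :=
  let name := if PySem.Str.isIn "+" font then
      PySem.List.pyGetD ((PySem.Str.split? font "+").getD []) (-1) ""
    else font
  PySem.Str.slice name none (some 4)

-- ===== PRECONDITION & SPEC =====
def Spec_math_font_prefix_py (font : String) (out : String) : Prop := out = math_font_prefix_py_alt font
instance (font : String) (out : String) : Decidable (Spec_math_font_prefix_py font out) := by unfold Spec_math_font_prefix_py; infer_instance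

-- ===== CLAIM (what is proved, stated in full; the proofs are below) =====
def Claim_equal_math_font_prefix_py : Prop := ∀ (font : String), Dom_math_font_prefix_py font → Spec_math_font_prefix_py font (math_font_prefix_py font)

-- ===== LEMMAS AND PROOFS =====

-- if name starts with a 4-character prefix p, then name[:4] = p
lemma slice4_of_startswith (name p : String) (hp : p.toList.length = 4)
    (h : PySem.Str.startswith name p = true) :
    PySem.Str.slice name none (some 4) = p := by
  obtain ⟨t, ht⟩ := (PySem.Chars.startswith_iff _ _).mp h
  have : PySem.Chars.slice name.toList none (some 4) = p.toList := by
    rw [PySem.Chars.slice, PySem.List.slice_to _ (by norm_num), ← ht]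
    have : (Int.toNat 4) = p.toList.length := by omega
    rw [this]
    exact List.take_left
  rw [PySem.Str.slice, this, String.ofList_toList]

-- the loop over any list of 4-character prefixes, then the fallback, returns name[:4]
lemma find?_prefix_eq_slice4 (name : String) (ps : List String)
    (h4 : ∀ p ∈ ps, p.toList.length = 4) :
    (match ps.find? (fun p => PySem.Str.startswith name p) with
     | some p => p
     | none =>
       if PySem.Str.startswith name "CMR" then PySem.Str.slice name none (some 4)
       else PySem.Str.slice name none (some 4)) = PySem.Str.slice name none (some 4) := by
  induction ps with
  | nil => simp
  | cons p ps ih =>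
    rw [List.find?_cons]
    by_cases h : PySem.Chars.startswith name.toList p.toList = true
    · simp [h, slice4_of_startswith name p (h4 p (by simp)) h]
    · simp only [Bool.not_eq_true] at h
      simp only [PySem.Str.startswith, h]
      exact ih (fun q hq => h4 q (by simp [hq]))

-- ===== VERDICT (by name: the statement is the Claim_ definition above) =====
theorem math_font_prefix_py_spec : Claim_equal_math_font_prefix_py := by
  intro font _
  unfold Spec_math_font_prefix_py math_font_prefix_py math_font_prefix_py_alt
  exact find?_prefix_eq_slice4 _ pvPrefixes (by decide)
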